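-- pv_equiv track=rewrite | github.com/chrisbetze/Apache-Spark-Project | code/B3_compare.py | both_tags
-- ===== SOURCE A (Python) =====
-- def both_tags(x):
--     l = False
--     r = False
--
--     for t in x[1]:
--         if t[-1] == 'r':
--             r = True
--         if t[-1] == 'l':
--             l = True
--         if l and r:
--             break
--
--     return l and r
-- ===== SOURCE B (Python) =====
-- def both_tags(x):
--     return any(t[-1] == 'l' for t in x[1]) and any(t[-1] == 'r' for t in x[1])
-- ===== Notes on version B (the rewrite author's own statement) =====
-- stated objective: idiomatic
-- what changed: Replaces the fused single pass maintaining two boolean flags with a combined break by two independent short-circuiting any() scans, one per suffix.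
import Mathlib
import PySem

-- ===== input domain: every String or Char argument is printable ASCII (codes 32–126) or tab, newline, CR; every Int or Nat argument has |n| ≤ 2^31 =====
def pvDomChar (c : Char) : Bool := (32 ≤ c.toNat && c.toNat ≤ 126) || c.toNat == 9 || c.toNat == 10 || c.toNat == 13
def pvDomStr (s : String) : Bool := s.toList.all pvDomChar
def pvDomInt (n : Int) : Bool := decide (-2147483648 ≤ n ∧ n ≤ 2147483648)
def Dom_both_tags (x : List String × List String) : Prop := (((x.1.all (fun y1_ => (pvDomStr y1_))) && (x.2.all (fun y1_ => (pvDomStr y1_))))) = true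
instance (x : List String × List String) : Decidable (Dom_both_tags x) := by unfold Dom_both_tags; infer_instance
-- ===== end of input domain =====

-- B rewrites A's single fused flag-loop-with-break as two independent short-circuiting any-scans (idiomatic; same cost).

-- ===== PORT A =====
-- loop over x[1] carrying the two flags l, r; break when both are set
def both_tags_loop : List String → Bool → Bool → Bool
  | [], l, r => l && r
  | t :: ts, l, r =>
    let r' := if PySem.Str.pyGet? t (-1) = some 'r' then true else r
    let l' := if PySem.Str.pyGet? t (-1) = some 'l' then true else l
    if l' && r' then l' && r' else both_tags_loop ts l' r'

def both_tags (x : List String × List String) : Bool :=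
  both_tags_loop x.2 false false

-- ===== PORT B =====
def both_tags_alt (x : List String × List String) : Bool :=
  (x.2.any (fun t => PySem.Str.pyGet? t (-1) == some 'l')) &&
  (x.2.any (fun t => PySem.Str.pyGet? t (-1) == some 'r'))

-- ===== PRECONDITION & SPEC =====
-- Pre_ excludes exactly the inputs on which Python A raises IndexError: an empty-string tag
-- reached before the break, i.e. an empty tag with no 'l'-suffixed tag or no 'r'-suffixed tag before it.
def Pre_both_tags (x : List String × List String) : Prop :=
  ∀ i < x.2.length, x.2.getD i "a" = "" →
    ((∃ j < i, PySem.Str.pyGet? (x.2.getD j "") (-1) = some 'l') ∧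
     (∃ k < i, PySem.Str.pyGet? (x.2.getD k "") (-1) = some 'r'))
instance (x : List String × List String) : Decidable (Pre_both_tags x) := by unfold Pre_both_tags; infer_instance

def pvWitness_both_tags : (List String × List String) := (["a"], ["al", "br", "", "c"])

def Spec_both_tags (x : List String × List String) (out : Bool) : Prop := out = both_tags_alt x
instance (x : List String × List String) (out : Bool) : Decidable (Spec_both_tags x out) := by unfold Spec_both_tags; infer_instance

-- ===== CLAIM (what is proved, stated in full; the proofs are below) =====
def Claim_equal_both_tags : Prop := ∀ (x : List String × List String), Dom_both_tags x → Pre_both_tags x → Spec_both_tags x (both_tags x)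

-- ===== LEMMAS AND PROOFS =====

-- (a == b) on Option Char as a decide, to line the two ports' tests up
theorem optChar_beq_eq_decide (a b : Option Char) : (a == b) = decide (a = b) := by
  by_cases h : a = b <;> simp [h]

-- loop invariant: the fused loop computes "l or an 'l'-suffix occurs" and "r or an 'r'-suffix occurs"
theorem both_tags_loop_eq (ts : List String) : ∀ (l r : Bool),
    both_tags_loop ts l r =
      ((l || ts.any (fun t => PySem.Str.pyGet? t (-1) == some 'l')) &&
       (r || ts.any (fun t => PySem.Str.pyGet? t (-1) == some 'r'))) := by
  induction ts with
  | nil => intro l r; simp [both_tags_loop]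
  | cons t ts ih =>
    intro l r
    by_cases hl : PySem.List.pyGet? t.toList (-1) = some 'l' <;>
      by_cases hr : PySem.List.pyGet? t.toList (-1) = some 'r' <;>
        cases l <;> cases r <;>
          simp_all [both_tags_loop, PySem.Str.pyGet?, List.any_cons, optChar_beq_eq_decide]

-- ===== VERDICT (by name: the statement is the Claim_ definition above) =====
theorem both_tags_spec : Claim_equal_both_tags := by
  intro x _ _
  unfold Spec_both_tags both_tags both_tags_alt
  rw [both_tags_loop_eq]
  simp
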